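-- pv_equiv track=rewrite | github.com/momia007/CEFL | backend/servicios/utils.py | ordenar_paises
-- ===== SOURCE A (Python) =====
-- def ordenar_paises(paises):
--     if not paises:
--         return []
--
--     paises_dict = [{'id': p['id'], 'nombre': p['nombre']} for p in paises if 'id' in p and 'nombre' in p]
--
--     return sorted(
--         paises_dict,
--         key=lambda p: (p['nombre'].strip().lower() == 'otro', p['nombre'].lower())
--     )
-- ===== SOURCE B (Python) =====
-- def ordenar_paises(paises):
--     # one pass: keep two (clave, dict) lists always sorted, insert each item in place
--     normales = []
--     otros = []
--     for p in paises:
--         if 'id' in p and 'nombre' in p: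
--             nombre = p['nombre']
--             q = {'id': p['id'], 'nombre': nombre}
--             clave = nombre.lower()
--             destino = otros if nombre.strip().lower() == 'otro' else normales
--             i = 0
--             while i < len(destino) and destino[i][0] <= clave:
--                 i += 1
--             destino.insert(i, (clave, q))
--     return [q for _, q in normales + otros]
-- ===== Notes on version B (the rewrite author's own statement) =====
-- stated objective: alternative
-- what changed: Replaces A's projection-then-composite-key sorted() call by a single pass that inserts each valid entry, decorated with its lowercased-name key, into one of two always-sorted lists (non-'otro' and 'otro') via in-place insertion, then concatenates and strips the keys.
import Mathlib
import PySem

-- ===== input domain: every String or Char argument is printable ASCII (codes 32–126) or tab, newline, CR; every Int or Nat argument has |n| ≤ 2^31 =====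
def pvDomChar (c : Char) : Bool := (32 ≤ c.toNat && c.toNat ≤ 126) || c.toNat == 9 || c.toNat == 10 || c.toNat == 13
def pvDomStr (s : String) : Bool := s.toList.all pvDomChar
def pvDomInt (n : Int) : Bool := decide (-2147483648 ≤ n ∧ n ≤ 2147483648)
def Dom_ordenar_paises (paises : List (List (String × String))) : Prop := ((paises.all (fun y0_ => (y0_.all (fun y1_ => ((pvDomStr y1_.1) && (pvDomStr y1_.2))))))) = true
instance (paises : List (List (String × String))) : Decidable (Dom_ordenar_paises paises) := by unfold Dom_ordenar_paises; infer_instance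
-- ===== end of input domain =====

-- B replaces A's projection + one composite-key sorted() call by a single pass that inserts each
-- valid entry, decorated with its lowercased-name key, into one of two always-sorted buckets
-- (non-'otro' / 'otro'), concatenated and undecorated at the end (objective: alternative).

-- ===== PORT A =====

-- p['nombre'].strip().lower() == 'otro'  (on a projected dict q)
def pvEsOtroA (q : List (String × String)) : Bool :=
  PySem.Str.lower (PySem.Str.strip ((PySem.Dict.ofList q).getD "nombre" "")) == "otro"

-- p['nombre'].lower()  (secondary key)
def pvClaveA (q : List (String × String)) : String :=
  PySem.Str.lower ((PySem.Dict.ofList q).getD "nombre" "")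

-- the comprehension [{'id': p['id'], 'nombre': p['nombre']} for p in paises if 'id' in p and 'nombre' in p]
def pvProjA (paises : List (List (String × String))) : List (List (String × String)) :=
  paises.filterMap (fun p =>
    match (PySem.Dict.ofList p).get? "id", (PySem.Dict.ofList p).get? "nombre" with
    | some i, some n => some [("id", i), ("nombre", n)]
    | _, _ => none)

def ordenar_paises (paises : List (List (String × String))) : List (List (String × String)) :=
  if paises = [] then []
  else
    let paises_dict := pvProjA paises
    PySem.List.sorted2 paises_dict (fun p => pvEsOtroA p) (fun p => pvClaveA p) false

-- ===== PORT B =====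

-- the while-loop + destino.insert(i, (clave, q)) : walk past entries whose key is ≤ clave, insert
def pvInsertaB (clave : String) (q : List (String × String)) :
    List (String × List (String × String)) → List (String × List (String × String))
  | [] => [(clave, q)]
  | (k, r) :: rest =>
    if k ≤ clave then (k, r) :: pvInsertaB clave q rest
    else (clave, q) :: (k, r) :: rest

-- the body of the for-loop: skip invalid entries, decorate, dispatch to the right bucket
def pvPasoB (st : List (String × List (String × String)) × List (String × List (String × String)))
    (p : List (String × String)) :
    List (String × List (String × String)) × List (String × List (String × String)) :=
  match (PySem.Dict.ofList p).get? "id", (PySem.Dict.ofList p).get? "nombre" with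
  | some i, some n =>
    let q : List (String × String) := [("id", i), ("nombre", n)]
    let clave := PySem.Str.lower n
    if PySem.Str.lower (PySem.Str.strip n) == "otro" then (st.1, pvInsertaB clave q st.2)
    else (pvInsertaB clave q st.1, st.2)
  | _, _ => st

def ordenar_paises_alt (paises : List (List (String × String))) : List (List (String × String)) :=
  let st := paises.foldl pvPasoB ([], [])
  (st.1 ++ st.2).map (·.2)

-- ===== PRECONDITION & SPEC =====
def Spec_ordenar_paises (paises : List (List (String × String))) (out : List (List (String × String))) : Prop := out = ordenar_paises_alt paises
instance (paises : List (List (String × String))) (out : List (List (String × String))) : Decidable (Spec_ordenar_paises paises out) := by unfold Spec_ordenar_paises; infer_instance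

-- ===== CLAIM (what is proved, stated in full; the proofs are below) =====
def Claim_equal_ordenar_paises : Prop := ∀ (paises : List (List (String × String))), Dom_ordenar_paises paises → Spec_ordenar_paises paises (ordenar_paises paises)

-- ===== LEMMAS AND PROOFS =====

theorem insertBy_congr_mem {α : Type} (f g : α → α → Bool) (x : α) (ys : List α)
    (h : ∀ y ∈ ys, f x y = g x y) :
    PySem.List.insertBy f x ys = PySem.List.insertBy g x ys := by
  induction ys with
  | nil => rfl
  | cons y ys ih =>
    simp only [PySem.List.insertBy]
    rw [h y (by simp)]
    by_cases hg : g x y = true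
    · simp [hg]
    · simp only [Bool.not_eq_true] at hg
      simp [hg, ih (fun z hz => h z (by simp [hz]))]

theorem insertBy_skip {α : Type} (f : α → α → Bool) (x : α) (A B : List α)
    (hA : ∀ a ∈ A, f x a = false) :
    PySem.List.insertBy f x (A ++ B) = A ++ PySem.List.insertBy f x B := by
  induction A with
  | nil => rfl
  | cons a A ih =>
    simp only [List.cons_append, PySem.List.insertBy, hA a (by simp)]
    simp [ih (fun z hz => hA z (by simp [hz]))]

theorem insertBy_prefix {α : Type} (f g : α → α → Bool) (x : α) (A B : List α)
    (hA : ∀ a ∈ A, f x a = g x a) (hB : ∀ b ∈ B, f x b = true) :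
    PySem.List.insertBy f x (A ++ B) = PySem.List.insertBy g x A ++ B := by
  induction A with
  | nil =>
    cases B with
    | nil => rfl
    | cons b B => simp [PySem.List.insertBy, hB b (by simp)]
  | cons a A ih =>
    simp only [List.cons_append, PySem.List.insertBy]
    rw [hA a (by simp)]
    by_cases hg : g x a = true
    · simp [hg]
    · simp only [Bool.not_eq_true] at hg
      simp [hg, ih (fun z hz => hA z (by simp [hz])) ]

-- the comparator sorted2 uses for a (Bool, String) key, and the plain String one
def pvLt2 (k1 : List (String × String) → Bool) (k2 : List (String × String) → String)
    (a b : List (String × String)) : Bool :=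
  decide (k1 a < k1 b) || (!decide (k1 b < k1 a) && decide (k2 a < k2 b))

def pvLtS (k2 : List (String × String) → String) (a b : List (String × String)) : Bool :=
  decide (k2 a < k2 b)

theorem pvLt2_ff (k1 : List (String × String) → Bool) (k2 : List (String × String) → String)
    (a b : List (String × String)) (ha : k1 a = false) (hb : k1 b = false) :
    pvLt2 k1 k2 a b = pvLtS k2 a b := by
  simp [pvLt2, pvLtS, ha, hb]

theorem pvLt2_tt (k1 : List (String × String) → Bool) (k2 : List (String × String) → String)
    (a b : List (String × String)) (ha : k1 a = true) (hb : k1 b = true) :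
    pvLt2 k1 k2 a b = pvLtS k2 a b := by
  simp [pvLt2, pvLtS, ha, hb]

theorem pvLt2_ft (k1 : List (String × String) → Bool) (k2 : List (String × String) → String)
    (a b : List (String × String)) (ha : k1 a = false) (hb : k1 b = true) :
    pvLt2 k1 k2 a b = true := by
  simp [pvLt2, ha, hb, Bool.lt_iff]

theorem pvLt2_tf (k1 : List (String × String) → Bool) (k2 : List (String × String) → String)
    (a b : List (String × String)) (ha : k1 a = true) (hb : k1 b = false) :
    pvLt2 k1 k2 a b = false := by
  simp [pvLt2, ha, hb, Bool.lt_iff]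

-- the partition invariant for A's lexicographic insertion-sort fold
theorem sorted2_fold_split (k1 : List (String × String) → Bool)
    (k2 : List (String × String) → String) :
    ∀ (xs A B : List (List (String × String))),
      (∀ a ∈ A, k1 a = false) → (∀ b ∈ B, k1 b = true) →
      xs.foldl (fun acc x => PySem.List.insertBy (pvLt2 k1 k2) x acc) (A ++ B)
        = (xs.filter (fun x => !k1 x)).foldl (fun acc x => PySem.List.insertBy (pvLtS k2) x acc) A
          ++ (xs.filter (fun x => k1 x)).foldl (fun acc x => PySem.List.insertBy (pvLtS k2) x acc) B := by
  intro xs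
  induction xs with
  | nil => intro A B _ _; simp
  | cons x xs ih =>
    intro A B hA hB
    by_cases hx : k1 x = true
    · have h1 : PySem.List.insertBy (pvLt2 k1 k2) x (A ++ B)
          = A ++ PySem.List.insertBy (pvLtS k2) x B := by
        rw [insertBy_skip _ _ _ _ (fun a ha => pvLt2_tf k1 k2 x a hx (hA a ha))]
        rw [insertBy_congr_mem _ (pvLtS k2) _ _ (fun b hb => pvLt2_tt k1 k2 x b hx (hB b hb))]
      simp only [List.foldl_cons, List.filter_cons, hx]
      simp only [Bool.not_true, Bool.false_eq_true, if_false, if_true]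
      rw [h1, ih A (PySem.List.insertBy (pvLtS k2) x B) hA
        (fun b hb => by
          rcases (PySem.List.mem_insertBy _ _ _ _).mp hb with h | h
          · exact h ▸ hx
          · exact hB b h)]
      simp
    · simp only [Bool.not_eq_true] at hx
      have h1 : PySem.List.insertBy (pvLt2 k1 k2) x (A ++ B)
          = PySem.List.insertBy (pvLtS k2) x A ++ B := by
        exact insertBy_prefix _ _ _ _ _ (fun a ha => pvLt2_ff k1 k2 x a hx (hA a ha))
          (fun b hb => pvLt2_ft k1 k2 x b hx (hB b hb))
      simp only [List.foldl_cons, List.filter_cons, hx]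
      simp only [Bool.not_false, if_true, Bool.false_eq_true, if_false]
      rw [h1, ih (PySem.List.insertBy (pvLtS k2) x A) B
        (fun a ha => by
          rcases (PySem.List.mem_insertBy _ _ _ _).mp ha with h | h
          · exact h ▸ hx
          · exact hA a h) hB]
      simp

theorem sorted2_eq_split (k1 : List (String × String) → Bool)
    (k2 : List (String × String) → String) (xs : List (List (String × String))) :
    PySem.List.sorted2 xs k1 k2 false
      = PySem.List.sorted (xs.filter (fun x => !k1 x)) k2 false
        ++ PySem.List.sorted (xs.filter (fun x => k1 x)) k2 false := by
  have h := sorted2_fold_split k1 k2 xs [] [] (by simp) (by simp)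
  simpa only [PySem.List.sorted2, PySem.List.sorted, pvLt2, pvLtS, Bool.false_eq_true,
    if_false] using h

-- decorate a projected dict with its key
def pvDec (q : List (String × String)) : String × List (String × String) := (pvClaveA q, q)

-- B's in-place bucket insertion is insertBy under the decoration
theorem pvInsertaB_eq_insertBy (x : List (String × String)) (ys : List (List (String × String))) :
    pvInsertaB (pvClaveA x) x (ys.map pvDec)
      = (PySem.List.insertBy (pvLtS pvClaveA) x ys).map pvDec := by
  induction ys with
  | nil => rfl
  | cons y ys ih =>
    simp only [List.map_cons, pvDec, pvInsertaB, PySem.List.insertBy, pvLtS]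
    by_cases h : pvClaveA y ≤ pvClaveA x
    · have : ¬ pvClaveA x < pvClaveA y := not_lt.mpr h
      simp [h, this, ih, pvDec]
    · have : pvClaveA x < pvClaveA y := lt_of_not_ge h
      simp [h, this, pvDec]

-- keys of the projected dict [("id",i),("nombre",n)]
theorem pvClaveA_proj (i n : String) : pvClaveA [("id", i), ("nombre", n)] = PySem.Str.lower n := by
  simp [pvClaveA, PySem.Dict.ofList, PySem.Dict.update]

theorem pvEsOtroA_proj (i n : String) :
    pvEsOtroA [("id", i), ("nombre", n)] = (PySem.Str.lower (PySem.Str.strip n) == "otro") := by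
  simp [pvEsOtroA, PySem.Dict.ofList, PySem.Dict.update]

-- the fold invariant relating B's two decorated buckets to the two filtered insertion sorts
theorem pasoB_fold_split :
    ∀ (xs : List (List (String × String))) (N O : List (List (String × String))),
      xs.foldl pvPasoB (N.map pvDec, O.map pvDec)
        = ((((pvProjA xs).filter (fun q => !pvEsOtroA q)).foldl
              (fun acc x => PySem.List.insertBy (pvLtS pvClaveA) x acc) N).map pvDec,
           (((pvProjA xs).filter (fun q => pvEsOtroA q)).foldl
              (fun acc x => PySem.List.insertBy (pvLtS pvClaveA) x acc) O).map pvDec) := by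
  intro xs
  induction xs with
  | nil => intro N O; rfl
  | cons p xs ih =>
    intro N O
    simp only [List.foldl_cons, pvPasoB, pvProjA, List.filterMap_cons]
    cases hid : (PySem.Dict.ofList p).get? "id" with
    | none =>
      cases hn : (PySem.Dict.ofList p).get? "nombre" with
      | none => exact ih N O
      | some n => exact ih N O
    | some i =>
      cases hn : (PySem.Dict.ofList p).get? "nombre" with
      | none => exact ih N O
      | some n =>
        simp only [List.filter_cons, pvEsOtroA_proj i n]
        by_cases hot : (PySem.Str.lower (PySem.Str.strip n) == "otro") = true
        · simp only [hot, if_true, Bool.not_true, Bool.false_eq_true, if_false]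
          have hkey : PySem.Str.lower n = pvClaveA [("id", i), ("nombre", n)] :=
            (pvClaveA_proj i n).symm
          rw [hkey, pvInsertaB_eq_insertBy]
          exact ih N (PySem.List.insertBy (pvLtS pvClaveA) [("id", i), ("nombre", n)] O)
        · simp only [Bool.not_eq_true] at hot
          simp only [hot, Bool.false_eq_true, if_false, Bool.not_false, if_true]
          have hkey : PySem.Str.lower n = pvClaveA [("id", i), ("nombre", n)] :=
            (pvClaveA_proj i n).symm
          rw [hkey, pvInsertaB_eq_insertBy]
          exact ih (PySem.List.insertBy (pvLtS pvClaveA) [("id", i), ("nombre", n)] N) O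

-- ===== VERDICT (by name: the statement is the Claim_ definition above) =====
theorem ordenar_paises_spec : Claim_equal_ordenar_paises := by
  intro paises _
  unfold Spec_ordenar_paises ordenar_paises ordenar_paises_alt
  have hB := pasoB_fold_split paises [] []
  simp only [List.map_nil] at hB
  by_cases h : paises = []
  · subst h; rfl
  · simp only [h, if_false]
    rw [hB]
    rw [sorted2_eq_split (fun p => pvEsOtroA p) (fun p => pvClaveA p) (pvProjA paises)]
    have hsorted : ∀ ys : List (List (String × String)),
        PySem.List.sorted ys pvClaveA false
          = ys.foldl (fun acc x => PySem.List.insertBy (pvLtS pvClaveA) x acc) [] := by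
      intro ys; rfl
    rw [hsorted, hsorted, ← List.map_append, List.map_map]
    have hcomp : ((fun x : String × List (String × String) => x.2) ∘ pvDec) = id := by
      funext q; rfl
    rw [hcomp, List.map_id]
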